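-- pv_equiv track=rewrite | github.com/jinhyeok0204/algo_study | stair.py | decide_point_num
-- ===== SOURCE A (Python) =====
-- def decide_point_num(stairs: list,  x: int):
--     step = 0
--     temp_x = 0
--     for i in range(0, len(stairs), 2):
--         temp_x += stairs[i]
--         step += 1
--         if x <= temp_x:
--             break
--     point_num = 2 * step - 1
--     return temp_x, point_num
-- ===== SOURCE B (Python) =====
-- def decide_point_num(stairs: list, x: int):
--     # two-phase: build the full prefix-sum table of the even-indexed stairs, then search it
--     prefix = []
--     s = 0
--     for v in stairs[::2]:
--         s += v
--         prefix.append(s)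
--     hit = next((i for i, p in enumerate(prefix) if x <= p), None)
--     if hit is not None:
--         return prefix[hit], 2 * hit + 1
--     if not prefix:
--         return 0, -1
--     return prefix[-1], 2 * len(prefix) - 1
-- ===== Notes on version B (the rewrite author's own statement) =====
-- stated objective: alternative
-- what changed: Replaces A's fused accumulate-and-early-break index loop with a two-phase structure: build the full prefix-sum table of the even-indexed stairs (stairs[::2]), then search that table for the first sum reaching x.
import Mathlib
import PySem

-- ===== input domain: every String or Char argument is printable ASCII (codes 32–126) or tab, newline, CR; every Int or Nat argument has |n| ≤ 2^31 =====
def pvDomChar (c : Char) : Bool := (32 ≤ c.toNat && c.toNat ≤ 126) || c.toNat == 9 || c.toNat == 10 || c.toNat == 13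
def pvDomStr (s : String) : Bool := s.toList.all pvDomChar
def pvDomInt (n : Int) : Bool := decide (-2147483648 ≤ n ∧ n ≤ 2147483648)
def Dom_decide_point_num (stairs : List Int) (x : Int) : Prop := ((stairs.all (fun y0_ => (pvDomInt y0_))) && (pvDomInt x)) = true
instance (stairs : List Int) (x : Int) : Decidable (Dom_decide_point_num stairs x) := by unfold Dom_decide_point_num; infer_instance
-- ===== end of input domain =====

-- B replaces A's fused accumulate-and-break loop by a two-phase structure (build the full
-- prefix-sum table of stairs[::2], then search it for the first sum reaching x); objective:
-- alternative decomposition, same O(n) cost.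

-- ===== PORT A =====
-- A's for-loop with break over range(0, len(stairs), 2), as structural recursion on the index list.
def pvLoopA (stairs : List Int) (x : Int) : List Int → Int → Int → Int × Int
  | [], step, temp_x => (temp_x, step)
  | i :: rest, step, temp_x =>
    -- stairs[i]: every i produced by range(0, len(stairs), 2) is in range, so the default is never used
    let temp' := temp_x + PySem.List.pyGetD stairs i 0
    if x ≤ temp' then (temp', step + 1)
    else pvLoopA stairs x rest (step + 1) temp'

def decide_point_num (stairs : List Int) (x : Int) : Int × Int :=
  let r := pvLoopA stairs x (PySem.List.pyRange 0 (stairs.length : Int) 2) 0 0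
  (r.1, 2 * r.2 - 1)

-- ===== PORT B =====
def decide_point_num_alt (stairs : List Int) (x : Int) : Int × Int :=
  -- stairs[::2]: step 2 ≠ 0, so slice? always returns some
  let evens := (PySem.List.slice? stairs none none 2).getD []
  -- phase 1: full running prefix sums of evens
  let pref := (evens.foldl (fun (acc : List Int × Int) v =>
      (acc.1 ++ [acc.2 + v], acc.2 + v)) ([], 0)).1
  -- phase 2: next((i for i, p in enumerate(prefix) if x <= p), None)
  match pref.findIdx? (fun p => decide (x ≤ p)) with
  | some hit => (PySem.List.pyGetD pref (hit : Int) 0, 2 * (hit : Int) + 1)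
  | none =>
    if pref = [] then (0, -1)
    else ((PySem.List.pyGet? pref (-1)).getD 0, 2 * (pref.length : Int) - 1)

-- ===== PRECONDITION & SPEC =====
def Spec_decide_point_num (stairs : List Int) (x : Int) (out : Int × Int) : Prop := out = decide_point_num_alt stairs x
instance (stairs : List Int) (x : Int) (out : Int × Int) : Decidable (Spec_decide_point_num stairs x out) := by unfold Spec_decide_point_num; infer_instance

-- ===== CLAIM (what is proved, stated in full; the proofs are below) =====
def Claim_equal_decide_point_num : Prop := ∀ (stairs : List Int) (x : Int), Dom_decide_point_num stairs x → Spec_decide_point_num stairs x (decide_point_num stairs x)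

-- ===== LEMMAS AND PROOFS =====

-- the even-indexed elements of a list
def pvEvens : List Int → List Int
  | [] => []
  | [a] => [a]
  | a :: _ :: t => a :: pvEvens t

-- A's loop expressed over the list of read values
def pvLoopV (x : Int) : List Int → Int → Int → Int × Int
  | [], step, temp => (temp, step)
  | v :: rest, step, temp =>
    if x ≤ temp + v then (temp + v, step + 1)
    else pvLoopV x rest (step + 1) (temp + v)

-- running prefix sums starting from t
def pvPrefix (t : Int) : List Int → List Int
  | [] => []
  | v :: r => (t + v) :: pvPrefix (t + v) r

theorem pvLoopA_eq_loopV (stairs : List Int) (x : Int) (l : List Int) (step temp : Int) :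
    pvLoopA stairs x l step temp
      = pvLoopV x (l.map (fun i => PySem.List.pyGetD stairs i 0)) step temp := by
  induction l generalizing step temp with
  | nil => rfl
  | cons i rest ih =>
      simp only [pvLoopA, pvLoopV, List.map_cons]
      split_ifs with h
      · rfl
      · exact ih _ _

theorem pvFilterMapAllSome {α β : Type} (p : α → Option β) (f : α → β) :
    ∀ l : List α, (∀ k ∈ l, p k = some (f k)) → l.filterMap p = l.map f := by
  intro l
  induction l with
  | nil => intro _; rfl
  | cons a t ih =>
      intro h
      simp only [List.filterMap_cons, List.map_cons, h a (by simp)]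
      rw [ih (fun k hk => h k (by simp [hk]))]

theorem pvRangeMapEvens (stairs : List Int) :
    (List.range ((stairs.length + 1) / 2)).map (fun k => stairs.getD (2 * k) 0)
      = pvEvens stairs := by
  induction stairs using pvEvens.induct with
  | case1 => rfl
  | case2 a => norm_num [pvEvens]
  | case3 a b t ih =>
      have hn : ((a :: b :: t).length + 1) / 2 = (t.length + 1) / 2 + 1 := by
        simp only [List.length_cons]; omega
      rw [hn, List.range_succ_eq_map, List.map_cons, List.map_map]
      simp only [pvEvens, List.cons.injEq]
      refine ⟨by simp, ?_⟩
      rw [← ih]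
      apply List.map_congr_left
      intro k _
      simp [List.getD, Nat.mul_add]

theorem pvA_reads_evens (stairs : List Int) :
    (PySem.List.pyRange 0 (stairs.length : Int) 2).map (fun i => PySem.List.pyGetD stairs i 0)
      = pvEvens stairs := by
  rw [PySem.List.pyRange_of_pos 0 (stairs.length : Int) (by norm_num), List.map_map]
  have hc : (if (0:Int) < (stairs.length : Int)
      then (((stairs.length : Int) - 0 + 2 - 1) / 2).toNat else 0)
      = (stairs.length + 1) / 2 := by
    split_ifs with h <;> omega
  rw [hc, ← pvRangeMapEvens stairs]
  apply List.map_congr_left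
  intro k _
  have : (0 : Int) + 2 * (k : Int) = ((2 * k : Nat) : Int) := by push_cast; ring
  simp only [Function.comp, this, PySem.List.pyGetD_natCast]

theorem pvSlice_evens (stairs : List Int) :
    (PySem.List.slice? stairs none none 2).getD [] = pvEvens stairs := by
  simp only [PySem.List.slice?, PySem.List.sliceIndices]
  norm_num
  have hc : (if 0 < stairs.length
      then (((stairs.length : Int) + 2 - 1) / 2).toNat else 0)
      = (stairs.length + 1) / 2 := by
    split_ifs with h <;> omega
  rw [hc]
  rw [pvFilterMapAllSome _ (fun k => stairs.getD (2 * k) 0) _ ?_]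
  · exact pvRangeMapEvens stairs
  · intro k hk
    simp only [List.mem_range] at hk
    have h2 : 2 * k < stairs.length := by omega
    have h3 : ((2 : Int) * (k : Int)).toNat = 2 * k := by omega
    simp only [h3, List.getElem?_eq_getElem h2, List.getD_eq_getElem _ _ h2]

theorem pvPrefix_foldl (e : List Int) : ∀ (acc : List Int) (t : Int),
    e.foldl (fun (acc : List Int × Int) v => (acc.1 ++ [acc.2 + v], acc.2 + v)) (acc, t)
      = (acc ++ pvPrefix t e, t + e.sum) := by
  induction e with
  | nil => intro acc t; simp [pvPrefix]
  | cons v r ih =>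
      intro acc t
      simp only [List.foldl_cons, pvPrefix, ih]
      simp only [Prod.mk.injEq, List.sum_cons]
      constructor
      · simp
      · ring

theorem pvPrefix_last (e : List Int) : ∀ (t : Int), e ≠ [] →
    (pvPrefix t e).getLast? = some (t + e.sum) := by
  induction e with
  | nil => intro t h; exact absurd rfl h
  | cons v r ih =>
      intro t _
      by_cases hr : r = []
      · subst hr; simp [pvPrefix]
      · have hstep : ((t + v) :: pvPrefix (t + v) r).getLast?
            = (pvPrefix (t + v) r).getLast? := by
          cases hr2 : r with
          | nil => exact absurd hr2 hr
          | cons a b => simp [pvPrefix, List.getLast?_cons_cons]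
        rw [pvPrefix]
        rw [hstep, ih (t + v) hr]
        congr 1
        simp only [List.sum_cons]
        ring

theorem pvPrefix_length (e : List Int) : ∀ t, (pvPrefix t e).length = e.length := by
  induction e with
  | nil => intro t; rfl
  | cons v r ih => intro t; simp [pvPrefix, ih]

theorem pvLoopV_char (x : Int) (e : List Int) : ∀ (step temp : Int),
    pvLoopV x e step temp
      = match (pvPrefix temp e).findIdx? (fun p => decide (x ≤ p)) with
        | some i => ((pvPrefix temp e).getD i 0, step + (i : Int) + 1)
        | none => (temp + e.sum, step + e.length) := by
  induction e with
  | nil => intro step temp; simp [pvLoopV, pvPrefix]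
  | cons v r ih =>
      intro step temp
      simp only [pvLoopV, pvPrefix, List.findIdx?_cons, decide_eq_true_eq]
      by_cases h : x ≤ temp + v
      · simp [h]
      · rw [if_neg h, if_neg h, ih (step + 1) (temp + v)]
        cases hfi : (pvPrefix (temp + v) r).findIdx? (fun p => decide (x ≤ p)) with
        | none =>
            simp only [hfi, Option.map_none, Prod.mk.injEq, List.sum_cons,
              List.length_cons]
            constructor
            · ring
            · push_cast; ring
        | some i =>
            simp only [hfi, Option.map_some, Prod.mk.injEq]
            constructor
            · simp [List.getD]
            · push_cast; ring

-- ===== VERDICT (by name: the statement is the Claim_ definition above) =====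
theorem decide_point_num_spec : Claim_equal_decide_point_num := by
  intro stairs x _
  unfold Spec_decide_point_num decide_point_num decide_point_num_alt
  rw [pvLoopA_eq_loopV, pvA_reads_evens, pvSlice_evens]
  dsimp only
  rw [pvPrefix_foldl]
  simp only [List.nil_append]
  rw [pvLoopV_char]
  cases hfi : (pvPrefix 0 (pvEvens stairs)).findIdx? (fun p => decide (x ≤ p)) with
  | some i =>
      simp only [hfi, Prod.mk.injEq]
      constructor
      · rw [PySem.List.pyGetD_natCast]
      · ring
  | none =>
      simp only [hfi]
      by_cases he : pvEvens stairs = []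
      · simp [he, pvPrefix]
      · have hp : pvPrefix 0 (pvEvens stairs) ≠ [] := by
          cases h : pvEvens stairs with
          | nil => exact absurd h he
          | cons a b => simp [pvPrefix]
        rw [if_neg hp]
        simp only [Prod.mk.injEq]
        constructor
        · rw [PySem.List.pyGet?_neg_one, pvPrefix_last _ _ he]
          simp
        · rw [pvPrefix_length]
          ring
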